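-- pv_equiv track=rewrite | github.com/RunMoony/algorithms-python | 프로그래머스/괄호회전하기.py | solution
-- ===== SOURCE A (Python) =====
-- def solution(s):
--     answer = 0
--     temp = list(s)
--     for _ in range(len(s)):
--         arr = []
--         for i in range(len(temp)):
--             if len(arr) >= 1:
--                 if arr[-1] == "[" and temp[i] == "]":
--                     arr.pop()
--                 elif arr[-1] == "(" and temp[i] == ")":
--                     arr.pop()
--                 elif arr[-1] == "{" and temp[i] == "}":
--                     arr.pop()
--                 else:
--                     arr.append(temp[i])
--             else:
--                 arr.append(temp[i])
--         if len(arr) == 0: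
--             answer+=1
--         temp.append(temp.pop(0))
--     return answer
-- ===== SOURCE B (Python) =====
-- def solution(s):
--     n = len(s)
--     m = 2 * n
--     d = s + s
--     close = {'(': ')', '[': ']', '{': '}'}
--     # One right-to-left pass over the doubled string builds match links:
--     # grp[p] = index just past the bracket group starting at p (None if no group starts at p),
--     # reach[p] = end of the maximal balanced run starting at p.
--     grp = [None] * m
--     reach = [0] * (m + 1)
--     reach[m] = m
--     for p in range(m - 1, -1, -1):
--         g = None
--         if d[p] in close:
--             r = reach[p + 1]
--             if r < m and d[r] == close[d[p]]:
--                 g = r + 1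
--         grp[p] = g
--         reach[p] = reach[g] if g is not None else p
--     # A rotation starting at i is valid iff chaining group links from i lands exactly on i+n.
--     ans = 0
--     for i in range(n):
--         e = i
--         while e < i + n and grp[e] is not None:
--             e = grp[e]
--         if e == i + n:
--             ans += 1
--     return ans
-- ===== Notes on version B (the rewrite author's own statement) =====
-- stated objective: faster
-- what changed: B drops A's rotate-and-recheck loop (n physical rotations, each re-run through a stack) and instead makes ONE right-to-left pass over the doubled string s+s that precomputes match links (grp[p] = end of the bracket group starting at p, via a reach[] table), then counts the start indices i from which chasing the links lands exactly at i+n.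
import Mathlib
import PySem

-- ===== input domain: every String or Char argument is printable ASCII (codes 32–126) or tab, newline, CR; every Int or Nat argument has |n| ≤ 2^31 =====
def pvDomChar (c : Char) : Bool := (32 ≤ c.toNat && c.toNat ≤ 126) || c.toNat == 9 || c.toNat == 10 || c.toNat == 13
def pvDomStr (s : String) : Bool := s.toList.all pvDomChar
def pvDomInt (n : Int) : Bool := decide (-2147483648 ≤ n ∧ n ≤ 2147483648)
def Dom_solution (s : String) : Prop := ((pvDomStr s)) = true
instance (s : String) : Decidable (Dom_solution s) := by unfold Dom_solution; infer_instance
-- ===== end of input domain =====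

-- B replaces A's n quadratic rotate-and-recheck passes by ONE right-to-left pass over the
-- doubled string that precomputes bracket-group match links, then counts the start indices
-- from which chasing the links lands exactly one window length away (measurably faster).

-- ===== PORT A =====
-- inner-loop body of A: one character against the stack `arr` (append/pop at the list's end,
-- exactly as Python's arr[-1]/append/pop)
def stepA (arr : List Char) (c : Char) : List Char :=
  if arr.length ≥ 1 then
    if arr.getLast? = some '[' ∧ c = ']' then arr.dropLast
    else if arr.getLast? = some '(' ∧ c = ')' then arr.dropLast
    else if arr.getLast? = some '{' ∧ c = '}' then arr.dropLast
    else arr ++ [c]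
  else arr ++ [c]

def solution (s : String) : Int :=
  (((List.range s.length).foldl
    (fun (st : Int × List Char) _ =>
      let arr := st.2.foldl stepA []
      let answer := if arr.length = 0 then st.1 + 1 else st.1
      (answer, st.2.drop 1 ++ st.2.take 1))   -- temp.append(temp.pop(0))
    (0, s.toList))).1

-- ===== PORT B =====
-- the dict `close` of Source B
def closeD : PySem.Dict Char Char := PySem.Dict.ofList [('(', ')'), ('[', ']'), ('{', '}')]

-- Source B's `while e < i+n and grp[e] is not None: e = grp[e]` loop; the fuel only makes the
-- loop total (links provably jump forward by ≥ 2, so fuel n+1 is never exhausted)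
def chase (grp : List (Option Nat)) (limit : Nat) : Nat → Nat → Nat
  | 0, e => e
  | f+1, e =>
    if e < limit then
      match grp.getD e none with
      | some q => chase grp limit f q
      | none => e
    else e

-- Source B's single right-to-left table-building loop (`for p in range(m-1,-1,-1)`), written as a
-- foldr over range m (foldr processes m-1 first — the same descending order, same state)
def buildTables (d : List Char) : List (Option Nat) × List Nat :=
  let m := d.length
  (List.range m).foldr
    (fun p (st : List (Option Nat) × List Nat) =>
      let c := d.getD p ' '
      let g : Option Nat :=
        if (closeD.get? c).isSome then
          let r := st.2.getD (p+1) 0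
          if r < m ∧ d.getD r ' ' = (closeD.get? c).getD ' ' then some (r+1) else none
        else none
      (st.1.set p g, st.2.set p (match g with | some q => st.2.getD q 0 | none => p)))
    (List.replicate m none, (List.replicate (m+1) 0).set m m)

def solution_alt (s : String) : Int :=
  let n := s.length
  let d := s.toList ++ s.toList          -- d = s + s
  let grp := (buildTables d).1
  (List.range n).foldl
    (fun (acc : Int) i => acc + (if chase grp (i + n) (n+1) i = i + n then 1 else 0)) 0

-- ===== PRECONDITION & SPEC =====
def Spec_solution (s : String) (out : Int) : Prop := out = solution_alt s
instance (s : String) (out : Int) : Decidable (Spec_solution s out) := by unfold Spec_solution; infer_instance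

-- ===== CLAIM (what is proved, stated in full; the proofs are below) =====
def Claim_equal_solution : Prop := ∀ (s : String), Dom_solution s → Spec_solution s (solution s)

-- ===== LEMMAS AND PROOFS =====

-- a char is an opening bracket
def openP (c : Char) : Prop := c = '(' ∨ c = '[' ∨ c = '{'

-- the matching closer of an opener
def closeOf (c : Char) : Char := if c = '(' then ')' else if c = '[' then ']' else '}'

-- balanced bracket words (the Dyck language over the three pairs)
inductive Bal : List Char → Prop
  | nil : Bal []
  | grp (o : Char) (u v : List Char) : openP o → Bal u → Bal v → Bal (o :: u ++ closeOf o :: v)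

-- ---- A-side: A's push-everything stack vs a clean option-stack machine ----

def pairsB : PySem.Dict Char Char := PySem.Dict.ofList [(')', '('), (']', '['), ('}', '{')]

-- clean machine: stack of chars with top at the END (like A's arr); none = already failed
def stepB (st : Option (List Char)) (c : Char) : Option (List Char) :=
  match st with
  | none => none
  | some stk =>
    if c = '(' ∨ c = '[' ∨ c = '{' then some (stk ++ [c])
    else
      match PySem.Dict.get? pairsB c with
      | some o => if stk ≠ [] ∧ stk.getLast? = some o then some stk.dropLast else none
      | none => none

-- invariant tying A's stack to the clean machine's state
def InvAB (arr : List Char) (st : Option (List Char)) : Prop :=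
  match st with
  | some b => arr = b ∧ ∀ x ∈ b, openP x
  | none => ∃ x ∈ arr, ¬ openP x

theorem pairsB_eq : pairsB = PySem.Dict.mk [(')', '('), (']', '['), ('}', '{')] := by decide

theorem get_pairsB (c : Char) :
    pairsB.get? c =
      if c = ')' then some '(' else if c = ']' then some '[' else
        if c = '}' then some '{' else none := by
  by_cases h1 : c = ')'
  · subst h1; decide
  · by_cases h2 : c = ']'
    · subst h2; decide
    · by_cases h3 : c = '}'
      · subst h3; decide
      · rw [if_neg h1, if_neg h2, if_neg h3, pairsB_eq]
        have k1 : ¬ (')' = c) := fun h => h1 h.symm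
        have k2 : ¬ (']' = c) := fun h => h2 h.symm
        have k3 : ¬ ('}' = c) := fun h => h3 h.symm
        simp [PySem.Dict.get?, k1, k2, k3]

theorem stepA_pop (arr : List Char) (c o : Char)
    (hpair : (o = '[' ∧ c = ']') ∨ (o = '(' ∧ c = ')') ∨ (o = '{' ∧ c = '}'))
    (hlast : arr.getLast? = some o) : stepA arr c = arr.dropLast := by
  have hlen : arr.length ≥ 1 := by
    cases arr with
    | nil => simp at hlast
    | cons a t => simp
  unfold stepA
  rw [if_pos hlen]
  rcases hpair with ⟨ho, hc⟩ | ⟨ho, hc⟩ | ⟨ho, hc⟩ <;> subst ho <;> subst hc <;>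
    split_ifs with h1 h2 h3 <;> simp_all

theorem stepA_push (arr : List Char) (c : Char)
    (h : ¬ ∃ o, arr.getLast? = some o ∧
        ((o = '[' ∧ c = ']') ∨ (o = '(' ∧ c = ')') ∨ (o = '{' ∧ c = '}'))) :
    stepA arr c = arr ++ [c] := by
  unfold stepA
  split_ifs with h1 h2 h3 h4 <;> try rfl
  · exact absurd ⟨'[', h2.1, Or.inl ⟨rfl, h2.2⟩⟩ h
  · exact absurd ⟨'(', h3.1, Or.inr (Or.inl ⟨rfl, h3.2⟩)⟩ h
  · exact absurd ⟨'{', h4.1, Or.inr (Or.inr ⟨rfl, h4.2⟩)⟩ h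

theorem nonopen_preserved {arr : List Char} (c : Char)
    (h : ∃ x ∈ arr, ¬ openP x) : ∃ x ∈ stepA arr c, ¬ openP x := by
  rcases h with ⟨x, hx, hno⟩
  by_cases hp : ∃ o, arr.getLast? = some o ∧
      ((o = '[' ∧ c = ']') ∨ (o = '(' ∧ c = ')') ∨ (o = '{' ∧ c = '}'))
  · rcases hp with ⟨o, hlast, hpair⟩
    have ho : openP o := by
      rcases hpair with ⟨rfl, _⟩ | ⟨rfl, _⟩ | ⟨rfl, _⟩ <;> simp [openP]
    refine ⟨x, ?_, hno⟩
    rw [stepA_pop arr c o hpair hlast]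
    have hne : arr ≠ [] := by
      intro h0; rw [h0] at hlast; simp at hlast
    have hsplit : arr.dropLast ++ [arr.getLast hne] = arr := List.dropLast_append_getLast hne
    rw [← hsplit] at hx
    rcases List.mem_append.1 hx with h' | h'
    · exact h'
    · exfalso
      have hxl : x = arr.getLast hne := by simpa using h'
      have : x = o := by
        rw [List.getLast?_eq_some_getLast hne] at hlast
        rw [hxl]; exact Option.some.inj hlast
      exact hno (this ▸ ho)
  · rw [stepA_push arr c hp]
    exact ⟨x, List.mem_append_left _ hx, hno⟩

theorem step_inv {arr : List Char} {st : Option (List Char)} (c : Char)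
    (h : InvAB arr st) : InvAB (stepA arr c) (stepB st c) := by
  match st with
  | none =>
      simp only [stepB]
      exact nonopen_preserved c h
  | some b =>
      obtain ⟨harr, hall⟩ := h
      subst harr
      by_cases hop : c = '(' ∨ c = '[' ∨ c = '{'
      · -- opener: both push
        have hA : stepA arr c = arr ++ [c] := by
          apply stepA_push
          rintro ⟨o, _, h'⟩
          rcases h' with ⟨_, rfl⟩ | ⟨_, rfl⟩ | ⟨_, rfl⟩ <;> exact absurd hop (by decide)
        have hBs : stepB (some arr) c = some (arr ++ [c]) := by
          simp only [stepB, if_pos hop]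
        rw [hA, hBs]
        show (arr ++ [c] = arr ++ [c]) ∧ ∀ x ∈ arr ++ [c], openP x
        refine ⟨rfl, ?_⟩
        intro x hx
        rcases List.mem_append.1 hx with h' | h'
        · exact hall x h'
        · have : x = c := by simpa using h'
          exact this ▸ hop
      · -- c is not an opener
        have hB0 : stepB (some arr) c =
            match pairsB.get? c with
            | some o => if arr ≠ [] ∧ arr.getLast? = some o then some arr.dropLast else none
            | none => none := by
          simp only [stepB, if_neg hop]
        by_cases hcl : c = ')' ∨ c = ']' ∨ c = '}'
        · -- c is a closer with partner o
          obtain ⟨o, hgo, hpairs⟩ :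
              ∃ o, pairsB.get? c = some o ∧
                ((o = '[' ∧ c = ']') ∨ (o = '(' ∧ c = ')') ∨ (o = '{' ∧ c = '}')) := by
            rcases hcl with rfl | rfl | rfl
            · exact ⟨'(', by rw [get_pairsB]; decide, by decide⟩
            · exact ⟨'[', by rw [get_pairsB]; decide, by decide⟩
            · exact ⟨'{', by rw [get_pairsB]; decide, by decide⟩
          rw [hB0, hgo]
          show InvAB (stepA arr c)
            (if arr ≠ [] ∧ arr.getLast? = some o then some arr.dropLast else none)
          by_cases hcond : arr ≠ [] ∧ arr.getLast? = some o
          · rw [if_pos hcond, stepA_pop arr c o hpairs hcond.2]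
            exact ⟨rfl, fun x hx => hall x (List.dropLast_subset _ hx)⟩
          · rw [if_neg hcond]
            have hA : stepA arr c = arr ++ [c] := by
              apply stepA_push
              rintro ⟨o', hl', hp'⟩
              have ho' : o' = o := by
                rcases hpairs with ⟨rfl, rfl⟩ | ⟨rfl, rfl⟩ | ⟨rfl, rfl⟩ <;>
                  rcases hp' with ⟨rfl, h''⟩ | ⟨rfl, h''⟩ | ⟨rfl, h''⟩ <;>
                    first | rfl | (exact absurd h'' (by decide))
              subst ho'
              exact hcond ⟨by intro h0; rw [h0] at hl'; simp at hl', hl'⟩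
            rw [hA]
            show ∃ x ∈ arr ++ [c], ¬ openP x
            exact ⟨c, List.mem_append_right _ (List.mem_singleton.2 rfl), hop⟩
        · -- c is neither an opener nor a closer
          have hgn : pairsB.get? c = none := by
            rw [get_pairsB]
            have k1 : ¬ (c = ')') := fun h => hcl (Or.inl h)
            have k2 : ¬ (c = ']') := fun h => hcl (Or.inr (Or.inl h))
            have k3 : ¬ (c = '}') := fun h => hcl (Or.inr (Or.inr h))
            simp [k1, k2, k3]
          rw [hB0, hgn]
          show InvAB (stepA arr c) none
          have hA : stepA arr c = arr ++ [c] := by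
            apply stepA_push
            rintro ⟨o, _, hp'⟩
            rcases hp' with ⟨_, rfl⟩ | ⟨_, rfl⟩ | ⟨_, rfl⟩ <;> exact hcl (by decide)
          rw [hA]
          show ∃ x ∈ arr ++ [c], ¬ openP x
          exact ⟨c, List.mem_append_right _ (List.mem_singleton.2 rfl), hop⟩

theorem fold_inv (t : List Char) :
    ∀ (arr : List Char) (st : Option (List Char)), InvAB arr st →
      InvAB (t.foldl stepA arr) (t.foldl stepB st) := by
  induction t with
  | nil => intro arr st h; exact h
  | cons c t ih => intro arr st h; exact ih _ _ (step_inv c h)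

theorem check_iff (t : List Char) :
    ((t.foldl stepA []).length = 0) ↔ (t.foldl stepB (some []) = some []) := by
  have h := fold_inv t [] (some []) (by simp [InvAB])
  match hst : t.foldl stepB (some []) with
  | some b =>
      rw [hst] at h
      obtain ⟨harr, _⟩ := h
      rw [harr]
      simp
  | none =>
      rw [hst] at h
      obtain ⟨x, hx, _⟩ := h
      constructor
      · intro hlen
        exact absurd hx (by simp [List.length_eq_zero_iff.1 hlen])
      · intro h'; exact absurd h' (by simp)

-- ---- the clean machine accepts exactly the balanced words ----

theorem foldl_stepB_none (u : List Char) : u.foldl stepB none = none := by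
  induction u with
  | nil => rfl
  | cons c u ih => simpa [stepB] using ih

theorem stepB_open {c : Char} (hc : openP c) (stk : List Char) :
    stepB (some stk) c = some (stk ++ [c]) := by
  have hc' : c = '(' ∨ c = '[' ∨ c = '{' := hc
  simp only [stepB, if_pos hc']

theorem stepB_close {o : Char} (ho : openP o) (stk : List Char) :
    stepB (some (stk ++ [o])) (closeOf o) = some stk := by
  have ho' : o = '(' ∨ o = '[' ∨ o = '{' := ho
  rcases ho' with rfl | rfl | rfl <;>
    simp [stepB, closeOf, get_pairsB]

theorem bal_machine {u : List Char} (h : Bal u) :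
    ∀ stk, u.foldl stepB (some stk) = some stk := by
  induction h with
  | nil => intro stk; rfl
  | grp o u v ho hu hv ihu ihv =>
      intro stk
      show List.foldl stepB (some stk) (o :: (u ++ closeOf o :: v)) = some stk
      rw [List.foldl_cons, stepB_open ho, List.foldl_append, ihu, List.foldl_cons,
        stepB_close ho, ihv]

-- `CSr rstk u` : from the machine state whose stack reversed is `rstk`, the word `u` drives the
-- machine to an empty stack (stated as what that means for the shape of `u`)
def CSr : List Char → List Char → Prop
  | [], u => Bal u
  | o :: r, u => ∃ w v, u = w ++ closeOf o :: v ∧ Bal w ∧ CSr r v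

theorem bal_append {a b : List Char} (ha : Bal a) (hb : Bal b) : Bal (a ++ b) := by
  induction ha with
  | nil => simpa using hb
  | grp o u v ho hu hv ihu ihv =>
      have h := Bal.grp o u (v ++ b) ho hu ihv
      simpa [List.append_assoc] using h

theorem absorbCS {b : List Char} (hb : Bal b) :
    ∀ r v, CSr r v → CSr r (b ++ v) := by
  intro r v h
  cases r with
  | nil => exact bal_append hb h
  | cons o r' =>
      obtain ⟨w, v', rfl, hw, hcs⟩ := h
      exact ⟨b ++ w, v', by simp, bal_append hb hw, hcs⟩

theorem pushCS {c : Char} (hc : openP c) {r u : List Char} (h : CSr (c :: r) u) :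
    CSr r (c :: u) := by
  obtain ⟨w, v, rfl, hw, hcs⟩ := h
  have hb : Bal (c :: w ++ closeOf c :: []) := Bal.grp c w [] hc hw Bal.nil
  have h2 := absorbCS hb r v hcs
  have he : (c :: w ++ closeOf c :: []) ++ v = c :: (w ++ closeOf c :: v) := by simp
  rwa [he] at h2

-- a closer's dict entry names its opener
theorem pairs_char {c o : Char} (h : pairsB.get? c = some o) : openP o ∧ c = closeOf o := by
  rw [get_pairsB] at h
  split_ifs at h with h1 h2 h3 <;> first
    | (cases h; subst h1; exact ⟨by simp [openP], by decide⟩)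
    | (cases h; subst h2; exact ⟨by simp [openP], by decide⟩)
    | (cases h; subst h3; exact ⟨by simp [openP], by decide⟩)
    | cases h

theorem machine_CSr (u : List Char) :
    ∀ stk, u.foldl stepB (some stk) = some [] → CSr stk.reverse u := by
  induction u with
  | nil =>
      intro stk h
      have : stk = [] := by simpa using h
      subst this
      exact Bal.nil
  | cons c u ih =>
      intro stk h
      rw [List.foldl_cons] at h
      by_cases hop : c = '(' ∨ c = '[' ∨ c = '{'
      · rw [stepB_open hop] at h
        have := ih (stk ++ [c]) h
        rw [List.reverse_append] at this
        exact pushCS hop (by simpa using this)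
      · cases hg : pairsB.get? c with
        | none =>
            rw [show stepB (some stk) c = none by simp [stepB, if_neg hop, hg]] at h
            rw [foldl_stepB_none] at h
            cases h
        | some o =>
            by_cases hcond : stk ≠ [] ∧ stk.getLast? = some o
            · rw [show stepB (some stk) c = some stk.dropLast by
                simp [stepB, if_neg hop, hg, hcond]] at h
              have ihd := ih stk.dropLast h
              obtain ⟨hoo, hcc⟩ := pairs_char hg
              have hne : stk ≠ [] := hcond.1
              have hlast : stk.getLast hne = o := by
                have := hcond.2
                rw [List.getLast?_eq_some_getLast hne] at this
                exact (Option.some.inj this.symm).symm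
              have hsplit : stk.dropLast ++ [o] = stk := by
                rw [← hlast]; exact List.dropLast_append_getLast hne
              have hrev : stk.reverse = o :: stk.dropLast.reverse := by
                rw [← hsplit]; simp
              rw [hrev]
              exact ⟨[], u, by rw [hcc]; rfl, Bal.nil, ihd⟩
            · rw [show stepB (some stk) c = none by
                simp only [stepB, if_neg hop, hg]; rw [if_neg hcond]] at h
              rw [foldl_stepB_none] at h
              cases h

theorem machine_bal_iff (u : List Char) :
    u.foldl stepB (some []) = some [] ↔ Bal u := by
  constructor
  · intro h
    simpa using machine_CSr u [] h
  · intro h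
    exact bal_machine h []

-- ---- the maximal-munch parser (spec of the match-link tables) ----

-- P f u = the suffix of u left after removing u's maximal balanced prefix (fuel f ≥ |u|)
def P : Nat → List Char → List Char
  | 0, u => u
  | _+1, [] => []
  | f+1, c :: u =>
    if c = '(' ∨ c = '[' ∨ c = '{' then
      match P f u with
      | [] => c :: u
      | e :: v => if e = closeOf c then P f v else c :: u
    else c :: u

-- P removes a balanced prefix
theorem P_suffix_bal : ∀ (f : Nat) (u : List Char), u.length ≤ f →
    ∃ b, u = b ++ P f u ∧ Bal b := by
  intro f
  induction f with
  | zero =>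
      intro u hu
      have : u = [] := List.length_eq_zero_iff.1 (Nat.le_zero.1 hu)
      subst this
      exact ⟨[], rfl, Bal.nil⟩
  | succ f ih =>
      intro u hu
      cases u with
      | nil => exact ⟨[], rfl, Bal.nil⟩
      | cons c u' =>
          by_cases hop : c = '(' ∨ c = '[' ∨ c = '{'
          · simp only [P, if_pos hop]
            obtain ⟨b1, hb1, hbal1⟩ := ih u' (by simpa using Nat.lt_succ_iff.1 hu)
            cases hw : P f u' with
            | nil => exact ⟨[], rfl, Bal.nil⟩
            | cons e v =>
                dsimp only
                by_cases he : e = closeOf c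
                · rw [if_pos he]
                  have hv : v.length ≤ f := by
                    have := congrArg List.length hb1
                    rw [hw] at this
                    simp at this
                    have hu' : u'.length ≤ f := by simpa using Nat.lt_succ_iff.1 hu
                    omega
                  obtain ⟨b2, hb2, hbal2⟩ := ih v hv
                  refine ⟨c :: b1 ++ closeOf c :: b2, ?_, Bal.grp c b1 b2 hop hbal1 hbal2⟩
                  have : u' = b1 ++ closeOf c :: (b2 ++ P f v) := by
                    rw [hb1, hw, he, ← hb2]
                  rw [this]
                  simp
                · rw [if_neg he]
                  exact ⟨[], rfl, Bal.nil⟩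
          · simp only [P, if_neg hop]
            exact ⟨[], rfl, Bal.nil⟩

-- fuel beyond the length is irrelevant
theorem P_fuel (f : Nat) (u : List Char) (h : u.length ≤ f) : P f u = P u.length u := by
  induction f using Nat.strong_induction_on generalizing u with
  | _ f ih =>
      cases f with
      | zero =>
          have : u = [] := List.length_eq_zero_iff.1 (Nat.le_zero.1 h)
          subst this; rfl
      | succ f =>
          cases u with
          | nil => rfl
          | cons c u' =>
              have hu' : u'.length ≤ f := by simpa using Nat.lt_succ_iff.1 h
              have h1 : P f u' = P u'.length u' := ih f (Nat.lt_succ_self f) u' hu'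
              show P (f+1) (c :: u') = P (u'.length + 1) (c :: u')
              by_cases hop : c = '(' ∨ c = '[' ∨ c = '{'
              · simp only [P, if_pos hop, h1]
                cases hw : P u'.length u' with
                | nil => rfl
                | cons e v =>
                    dsimp only
                    by_cases he : e = closeOf c
                    · rw [if_pos he, if_pos he]
                      obtain ⟨b1, hb1, _⟩ := P_suffix_bal u'.length u' le_rfl
                      have hv : v.length ≤ f := by
                        have := congrArg List.length hb1
                        rw [hw] at this
                        simp at this
                        omega
                      have hvu : v.length ≤ u'.length := by
                        have := congrArg List.length hb1
                        rw [hw] at this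
                        simp at this
                        omega
                      rw [ih f (Nat.lt_succ_self f) v hv,
                        ih u'.length (Nat.lt_succ_of_le hu') v hvu]
                    · rw [if_neg he, if_neg he]
              · simp only [P, if_neg hop]

theorem not_open_closeOf {o : Char} (ho : openP o) : ¬ openP (closeOf o) := by
  have ho' : o = '(' ∨ o = '[' ∨ o = '{' := ho
  rcases ho' with rfl | rfl | rfl <;> (intro h; rcases h with h | h | h <;> simp_all [closeOf])

-- maximal munch stops exactly at a non-opener: P (b ++ w) = w for balanced b
theorem P_stop {b : List Char} (hb : Bal b) :
    ∀ (w : List Char) (f : Nat), b.length + w.length ≤ f →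
      (∀ x, w.head? = some x → ¬ openP x) → P f (b ++ w) = w := by
  induction hb with
  | nil =>
      intro w f hf hw
      cases f with
      | zero => rfl
      | succ f =>
          cases w with
          | nil => rfl
          | cons x v =>
              have hx : ¬ (x = '(' ∨ x = '[' ∨ x = '{') := hw x rfl
              simp only [List.nil_append, P, if_neg hx]
  | grp o a b' ho ha hb' iha ihb' =>
      intro w f hf hw
      have hlen : (o :: a ++ closeOf o :: b').length = a.length + b'.length + 2 := by
        simp; omega
      cases f with
      | zero => omega
      | succ f =>
          have ho' : o = '(' ∨ o = '[' ∨ o = '{' := ho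
          have heq : (o :: a ++ closeOf o :: b') ++ w = o :: (a ++ closeOf o :: (b' ++ w)) := by
            simp
          rw [heq]
          simp only [P, if_pos ho']
          rw [hlen] at hf
          have hstop1 : P f (a ++ closeOf o :: (b' ++ w)) = closeOf o :: (b' ++ w) := by
            apply iha
            · simp only [List.length_cons, List.length_append]; omega
            · intro x hx
              have hxx : closeOf o = x := by simpa using hx
              exact hxx ▸ not_open_closeOf ho
          rw [hstop1]
          dsimp only
          rw [if_pos rfl]
          apply ihb'
          · omega
          · exact hw

-- ---- the specification values of the two tables ----

-- end of the maximal balanced run of d starting at p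
def rS (d : List Char) (p : Nat) : Nat := d.length - (P (d.drop p).length (d.drop p)).length

-- spec of grp[p] (mirrors the port's formula, with reach replaced by rS)
def gS (d : List Char) (p : Nat) : Option Nat :=
  if (closeD.get? (d.getD p ' ')).isSome then
    let r := rS d (p+1)
    if r < d.length ∧ d.getD r ' ' = (closeD.get? (d.getD p ' ')).getD ' ' then some (r+1) else none
  else none

theorem closeD_eq : closeD = PySem.Dict.mk [('(', ')'), ('[', ']'), ('{', '}')] := by decide

theorem get_closeD (c : Char) :
    closeD.get? c =
      if c = '(' then some ')' else if c = '[' then some ']' else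
        if c = '{' then some '}' else none := by
  by_cases h1 : c = '('
  · subst h1; decide
  · by_cases h2 : c = '['
    · subst h2; decide
    · by_cases h3 : c = '{'
      · subst h3; decide
      · rw [if_neg h1, if_neg h2, if_neg h3, closeD_eq]
        have k1 : ¬ ('(' = c) := fun h => h1 h.symm
        have k2 : ¬ ('[' = c) := fun h => h2 h.symm
        have k3 : ¬ ('{' = c) := fun h => h3 h.symm
        simp [PySem.Dict.get?, k1, k2, k3]

theorem closeD_isSome (c : Char) : (closeD.get? c).isSome = true ↔ openP c := by
  rw [get_closeD]
  unfold openP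
  split_ifs with h1 h2 h3 <;> simp_all

theorem closeD_getD {c : Char} (hc : openP c) : (closeD.get? c).getD ' ' = closeOf c := by
  have hc' : c = '(' ∨ c = '[' ∨ c = '{' := hc
  rcases hc' with rfl | rfl | rfl <;> decide

theorem rS_le (d : List Char) (p : Nat) : rS d p ≤ d.length := Nat.sub_le _ _

theorem rS_spec (d : List Char) (p : Nat) (hp : p ≤ d.length) :
    p ≤ rS d p ∧ d.drop (rS d p) = P (d.drop p).length (d.drop p) := by
  obtain ⟨b, hb, _⟩ := P_suffix_bal (d.drop p).length (d.drop p) le_rfl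
  revert hb
  generalize hPu : P (d.drop p).length (d.drop p) = Pu
  intro hb
  have hlen : (d.drop p).length = d.length - p := List.length_drop ..
  have hlen2 : (d.drop p).length = b.length + Pu.length := by
    rw [hb]; simp
  have hrs : rS d p = d.length - Pu.length := by
    unfold rS; rw [hPu]
  have hval : rS d p = p + b.length := by omega
  refine ⟨by omega, ?_⟩
  rw [hval, ← List.drop_drop, hb, List.drop_left]

-- the DP recursion equations for rS
theorem rS_out (d : List Char) (p : Nat) (hp : d.length ≤ p) : rS d p = d.length := by
  unfold rS
  rw [List.drop_of_length_le hp]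
  rfl

theorem getD_at (d : List Char) (p : Nat) (hp : p < d.length) : d.getD p ' ' = d[p] := by
  simp [List.getD_eq_getElem?_getD, List.getElem?_eq_getElem hp]

theorem rS_step (d : List Char) (p : Nat) (hp : p < d.length) :
    (gS d p = none ∧ rS d p = p) ∨
    (∃ q, gS d p = some q ∧ rS d p = rS d q ∧ p + 2 ≤ q ∧ q ≤ d.length) := by
  have hget : d.getD p ' ' = d[p] := getD_at d p hp
  have hdrop : d.drop p = d[p] :: d.drop (p+1) := List.drop_eq_getElem_cons hp
  by_cases hop : openP d[p]
  · have hop' : d[p] = '(' ∨ d[p] = '[' ∨ d[p] = '{' := hop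
    have hp1 : p + 1 ≤ d.length := hp
    obtain ⟨hr_ge, hr_drop⟩ := rS_spec d (p+1) hp1
    have hr_le : rS d (p+1) ≤ d.length := rS_le d (p+1)
    by_cases hcond : rS d (p+1) < d.length ∧ d.getD (rS d (p+1)) ' ' = closeOf d[p]
    · right
      refine ⟨rS d (p+1) + 1, ?_, ?_, by omega, by omega⟩
      · unfold gS
        rw [hget, if_pos ((closeD_isSome _).2 hop), closeD_getD hop]
        exact if_pos hcond
      · have hgetr : d.getD (rS d (p+1)) ' ' = d[rS d (p+1)]'(hcond.1) := getD_at d _ hcond.1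
        have hdropr : d.drop (rS d (p+1))
            = d[rS d (p+1)]'(hcond.1) :: d.drop (rS d (p+1) + 1) :=
          List.drop_eq_getElem_cons hcond.1
        have hPu' : P (d.drop (p+1)).length (d.drop (p+1))
            = closeOf d[p] :: d.drop (rS d (p+1) + 1) := by
          rw [← hr_drop, hdropr, ← hgetr, hcond.2]
        set q := rS d (p+1) + 1 with hq
        have hfeq : P (d.drop p).length (d.drop p) = P (d.drop q).length (d.drop q) := by
          rw [hdrop]
          simp only [List.length_cons, P, if_pos hop', hPu']
          split
          · apply P_fuel
            rw [List.length_drop, List.length_drop]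
            omega
          · next hcc => exact absurd rfl hcc
        unfold rS
        rw [hfeq]
    · left
      constructor
      · unfold gS
        rw [hget, if_pos ((closeD_isSome _).2 hop), closeD_getD hop]
        exact if_neg hcond
      · have hPfull : P (d.drop p).length (d.drop p) = d.drop p := by
          by_cases hrm : rS d (p+1) < d.length
          · have hne : d.getD (rS d (p+1)) ' ' ≠ closeOf d[p] := fun h => hcond ⟨hrm, h⟩
            have hgetr : d.getD (rS d (p+1)) ' ' = d[rS d (p+1)]'hrm := getD_at d _ hrm
            have hdropr : d.drop (rS d (p+1))
                = d[rS d (p+1)]'hrm :: d.drop (rS d (p+1) + 1) :=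
              List.drop_eq_getElem_cons hrm
            have hPu' : P (d.drop (p+1)).length (d.drop (p+1))
                = d[rS d (p+1)]'hrm :: d.drop (rS d (p+1) + 1) := by
              rw [← hr_drop, hdropr]
            conv_lhs => rw [hdrop]
            simp only [List.length_cons, P, if_pos hop', hPu']
            rw [if_neg (by rw [← hgetr]; exact hne), ← hdrop]
          · have hrm' : rS d (p+1) = d.length := by omega
            have hPu' : P (d.drop (p+1)).length (d.drop (p+1)) = [] := by
              rw [← hr_drop, hrm', List.drop_length]
            conv_lhs => rw [hdrop]
            simp only [List.length_cons, P, if_pos hop', hPu']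
            rw [← hdrop]
        unfold rS
        rw [hPfull, List.length_drop]
        omega
  · left
    constructor
    · unfold gS
      rw [hget, if_neg (fun h => hop ((closeD_isSome _).1 h))]
    · have hop2 : ¬ (d[p] = '(' ∨ d[p] = '[' ∨ d[p] = '{') := hop
      have hPfull : P (d.drop p).length (d.drop p) = d.drop p := by
        conv_lhs => rw [hdrop]
        simp only [List.length_cons, P]
        rw [if_neg hop2, ← hdrop]
      unfold rS
      rw [hPfull, List.length_drop]
      omega

-- ---- the built tables compute gS and rS ----

theorem getD_set_self {α : Type} (l : List α) (i : Nat) (a dflt : α) (h : i < l.length) :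
    (l.set i a).getD i dflt = a := by
  simp [List.getD_eq_getElem?_getD, h]

theorem getD_set_ne {α : Type} (l : List α) {i j : Nat} (a dflt : α) (h : i ≠ j) :
    (l.set i a).getD j dflt = l.getD j dflt := by
  simp [List.getD_eq_getElem?_getD, List.getElem?_set_ne, h]

-- the body of Source B's table-building loop, named for the proofs
def bStep (d : List Char) (p : Nat) (st : List (Option Nat) × List Nat) :
    List (Option Nat) × List Nat :=
  let c := d.getD p ' '
  let g : Option Nat :=
    if (closeD.get? c).isSome then
      let r := st.2.getD (p+1) 0
      if r < d.length ∧ d.getD r ' ' = (closeD.get? c).getD ' ' then some (r+1) else none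
    else none
  (st.1.set p g, st.2.set p (match g with | some q => st.2.getD q 0 | none => p))

def bInit (d : List Char) : List (Option Nat) × List Nat :=
  (List.replicate d.length none, (List.replicate (d.length+1) 0).set d.length d.length)

theorem buildTables_eq (d : List Char) :
    buildTables d = (List.range d.length).foldr (bStep d) (bInit d) := rfl

theorem build_aux (d : List Char) :
    ∀ k, k ≤ d.length →
      ((List.range' (d.length - k) k).foldr (bStep d) (bInit d)).1.length = d.length ∧
      ((List.range' (d.length - k) k).foldr (bStep d) (bInit d)).2.length = d.length + 1 ∧
      (∀ q, d.length - k ≤ q → q < d.length →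
        ((List.range' (d.length - k) k).foldr (bStep d) (bInit d)).1.getD q none = gS d q) ∧
      (∀ q, d.length - k ≤ q → q ≤ d.length →
        ((List.range' (d.length - k) k).foldr (bStep d) (bInit d)).2.getD q 0 = rS d q) := by
  intro k
  induction k with
  | zero =>
      intro _
      refine ⟨by simp [bInit], by simp [bInit], ?_, ?_⟩
      · intro q h1 h2; omega
      · intro q h1 h2
        have hq : q = d.length := by omega
        subst hq
        rw [show (List.range' (d.length - 0) 0) = [] from rfl]
        show (bInit d).2.getD d.length 0 = rS d d.length
        rw [rS_out d d.length le_rfl]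
        unfold bInit
        exact getD_set_self _ _ _ _ (by simp)
  | succ k ih =>
      intro hk
      have hIH := ih (by omega)
      set p := d.length - (k+1) with hp
      have hpk : d.length - k = p + 1 := by omega
      have hplt : p < d.length := by omega
      rw [hpk] at hIH
      obtain ⟨ih1, ih2, ih3, ih4⟩ := hIH
      have hrange : List.range' p (k+1) = p :: List.range' (p+1) k := List.range'_succ
      rw [hrange, List.foldr_cons]
      set prev := (List.range' (p+1) k).foldr (bStep d) (bInit d) with hprev
      -- the step computes gS and rS at p
      have hg : (if (closeD.get? (d.getD p ' ')).isSome then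
            (let r := prev.2.getD (p+1) 0;
             if r < d.length ∧ d.getD r ' ' = (closeD.get? (d.getD p ' ')).getD ' '
             then some (r+1) else none)
          else none) = gS d p := by
        rw [ih4 (p+1) (by omega) (by omega)]
        rfl
      have hval : (match gS d p with
          | some q => prev.2.getD q 0
          | none => p) = rS d p := by
        rcases rS_step d p hplt with ⟨hgn, hrn⟩ | ⟨q', hgs, hrs, hq1, hq2⟩
        · rw [hgn]
          dsimp only
          rw [hrn]
        · rw [hgs]
          dsimp only
          rw [ih4 q' (by omega) hq2, hrs]
      have hstep : bStep d p prev
          = (prev.1.set p (gS d p), prev.2.set p (rS d p)) := by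
        show (prev.1.set p _, prev.2.set p _) = _
        rw [hg, hval]
      rw [hstep]
      refine ⟨by simpa using ih1, by simpa using ih2, ?_, ?_⟩
      · intro q h1 h2
        by_cases hqp : q = p
        · subst hqp
          exact getD_set_self _ _ _ _ (by omega)
        · rw [getD_set_ne _ _ _ (fun h => hqp h.symm)]
          exact ih3 q (by omega) h2
      · intro q h1 h2
        by_cases hqp : q = p
        · subst hqp
          exact getD_set_self _ _ _ _ (by omega)
        · rw [getD_set_ne _ _ _ (fun h => hqp h.symm)]
          exact ih4 q (by omega) h2

theorem build_correct (d : List Char) :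
    (∀ q, q < d.length → (buildTables d).1.getD q none = gS d q) ∧
    (∀ q, q ≤ d.length → (buildTables d).2.getD q 0 = rS d q) := by
  have h := build_aux d d.length le_rfl
  rw [Nat.sub_self] at h
  rw [buildTables_eq, List.range_eq_range']
  exact ⟨fun q hq => h.2.2.1 q (by omega) hq, fun q hq => h.2.2.2 q (by omega) hq⟩

-- ---- chasing the links decides balancedness of a window ----

-- segment [a, b) of d
def seg (d : List Char) (a b : Nat) : List Char := (d.drop a).take (b - a)

theorem seg_append (d : List Char) {a b c : Nat} (h1 : a ≤ b) (h2 : b ≤ c) :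
    seg d a b ++ seg d b c = seg d a c := by
  unfold seg
  have hd : d.drop b = (d.drop a).drop (b - a) := by
    rw [List.drop_drop]
    congr 1
    omega
  rw [hd, show c - a = (b - a) + (c - b) from by omega, List.take_add]

theorem gS_sound {d : List Char} {p q : Nat} (h : gS d p = some q) :
    p < d.length ∧ p + 2 ≤ q ∧ q ≤ d.length ∧ Bal (seg d p q) := by
  by_cases hs : (closeD.get? (d.getD p ' ')).isSome = true
  swap
  · unfold gS at h
    rw [if_neg hs] at h
    cases h
  have hop : openP (d.getD p ' ') := (closeD_isSome _).1 hs
  have hplt : p < d.length := by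
    by_contra hge
    push_neg at hge
    have hsp : d.getD p ' ' = ' ' := by
      rw [List.getD_eq_getElem?_getD, List.getElem?_eq_none (by omega)]
      rfl
    rw [hsp] at hop
    rcases hop with h' | h' | h' <;> simp_all
  unfold gS at h
  rw [if_pos hs, closeD_getD hop] at h
  dsimp only at h
  by_cases hcond : rS d (p+1) < d.length ∧ d.getD (rS d (p+1)) ' ' = closeOf (d.getD p ' ')
  swap
  · rw [if_neg hcond] at h
    cases h
  rw [if_pos hcond] at h
  have hq : q = rS d (p+1) + 1 := (Option.some.inj h).symm
  have hc : d.getD p ' ' = d[p] := getD_at d p hplt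
  have hp1 : p + 1 ≤ d.length := hplt
  obtain ⟨hr_ge, hr_drop⟩ := rS_spec d (p+1) hp1
  obtain ⟨b, hb, hbal⟩ := P_suffix_bal (d.drop (p+1)).length (d.drop (p+1)) le_rfl
  rw [← hr_drop] at hb
  have hlb : b.length = rS d (p+1) - (p+1) := by
    have := congrArg List.length hb
    simp only [List.length_append, List.length_drop] at this
    have hle := rS_le d (p+1)
    omega
  refine ⟨hplt, by omega, by omega, ?_⟩
  have hgr : d.getD (rS d (p+1)) ' ' = d[rS d (p+1)]'(hcond.1) := getD_at d _ hcond.1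
  have hdropr : d.drop (rS d (p+1)) = closeOf d[p] :: d.drop (rS d (p+1) + 1) := by
    rw [List.drop_eq_getElem_cons hcond.1]
    congr 1
    rw [← hgr, hcond.2, hc]
    rfl
  have hseg : seg d p q = d[p] :: (b ++ [closeOf d[p]]) := by
    unfold seg
    rw [List.drop_eq_getElem_cons hplt, hb, hdropr,
      show q - p = (b.length + 1) + 1 from by omega, List.take_succ_cons,
      List.take_append, List.take_of_length_le (by omega),
      show b.length + 1 - b.length = 1 from by omega]
    rfl
  rw [hseg]
  have hopp : openP d[p] := hc ▸ hop
  exact Bal.grp d[p] b [] hopp hbal Bal.nil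

theorem gS_complete {d : List Char} {p : Nat} {o : Char} {a rest : List Char}
    (ho : openP o) (ha : Bal a) (hd : d.drop p = o :: a ++ closeOf o :: rest) :
    gS d p = some (p + a.length + 2) := by
  have hplt : p < d.length := by
    by_contra hge
    push_neg at hge
    rw [List.drop_of_length_le hge] at hd
    cases hd
  have hda : d.drop p = d[p] :: d.drop (p+1) := List.drop_eq_getElem_cons hplt
  rw [hda] at hd
  obtain ⟨hdo, hdrest⟩ : d[p] = o ∧ d.drop (p+1) = a ++ closeOf o :: rest := by
    injection hd with h1 h2
    exact ⟨h1, h2⟩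
  have hc : d.getD p ' ' = d[p] := getD_at d p hplt
  -- the maximal munch of the suffix after p+1 is exactly a
  have hP : P (d.drop (p+1)).length (d.drop (p+1)) = closeOf o :: rest := by
    conv_lhs => rw [hdrest]
    apply P_stop ha
    · simp only [List.length_append, List.length_cons]
      omega
    · intro x hx
      have hxx : closeOf o = x := by simpa using hx
      exact hxx ▸ not_open_closeOf ho
  have hlen1 : (d.drop (p+1)).length = d.length - (p+1) := List.length_drop ..
  have hlen2 : (d.drop (p+1)).length = a.length + 1 + rest.length := by
    rw [hdrest]
    simp only [List.length_append, List.length_cons]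
    omega
  have hr : rS d (p+1) = p + 1 + a.length := by
    unfold rS
    rw [hP]
    simp only [List.length_cons]
    omega
  have hrlt : rS d (p+1) < d.length := by omega
  have hdr : d.drop (rS d (p+1)) = closeOf o :: rest := by
    have h1 : d.drop (rS d (p+1)) = (d.drop (p+1)).drop a.length := by
      rw [List.drop_drop, hr]
    rw [h1, hdrest, List.drop_left]
  have hgr : d.getD (rS d (p+1)) ' ' = closeOf o := by
    rw [getD_at d _ hrlt]
    have h2 := List.drop_eq_getElem_cons hrlt
    rw [hdr] at h2
    injection h2 with h21 h22
    exact h21.symm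
  unfold gS
  rw [show d.getD p ' ' = o from by rw [hc, hdo],
    if_pos ((closeD_isSome o).2 ho), closeD_getD ho]
  dsimp only
  rw [if_pos ⟨hrlt, hgr⟩]
  exact congrArg some (by omega)

theorem chase_at_limit (G : List (Option Nat)) (L : Nat) :
    ∀ (f e : Nat), L ≤ e → chase G L f e = e := by
  intro f e h
  cases f with
  | zero => rfl
  | succ f => simp only [chase, if_neg (Nat.not_lt.2 h)]

theorem chase_of_bal {d : List Char} {G : List (Option Nat)}
    (HG : ∀ q, q < d.length → G.getD q none = gS d q) {L : Nat} (hL : L ≤ d.length) :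
    ∀ (v : List Char), Bal v → ∀ (f e : Nat), e ≤ L → seg d e L = v → L - e = v.length →
      v.length ≤ 2 * f → chase G L f e = L := by
  intro v hv
  induction hv with
  | nil =>
      intro f e he _ hlen _
      have heL : e = L := by simp at hlen; omega
      rw [heL]
      exact chase_at_limit G L f L le_rfl
  | grp o a b ho ha hb iha ihb =>
      intro f e he hseg hlen hfuel
      have hlv : (o :: a ++ closeOf o :: b).length = a.length + b.length + 2 := by
        simp only [List.length_cons, List.length_append]
        omega
      rw [hlv] at hlen hfuel
      cases f with
      | zero => omega
      | succ f =>
          have heL : L = e + (a.length + b.length + 2) := by omega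
          have hdropfull : d.drop e = (o :: a ++ closeOf o :: b) ++ d.drop L := by
            have h2 : (d.drop e).drop (L - e) = d.drop L := by
              rw [List.drop_drop]
              congr 1
              omega
            conv_lhs => rw [← List.take_append_drop (L - e) (d.drop e)]
            rw [h2]
            unfold seg at hseg
            rw [hseg]
          have hdropfull' : d.drop e = o :: a ++ closeOf o :: (b ++ d.drop L) := by
            rw [hdropfull]; simp
          have hg := gS_complete ho ha hdropfull'
          have heLlt : e < L := by omega
          have hgG : G.getD e none = some (e + a.length + 2) := by
            rw [HG e (by omega), hg]
          show chase G L (f+1) e = L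
          simp only [chase, if_pos heLlt, hgG]
          apply ihb f (e + a.length + 2) (by omega) ?_ (by omega) (by omega)
          have hd2 : d.drop (e + a.length + 2) = b ++ d.drop L := by
            have h3 : d.drop (e + a.length + 2) = (d.drop e).drop (a.length + 2) := by
              rw [List.drop_drop]
              congr 1 <;> omega
            have h4 : o :: a ++ closeOf o :: (b ++ d.drop L)
                = (o :: a ++ [closeOf o]) ++ (b ++ d.drop L) := by simp
            rw [h3, hdropfull', h4,
              show a.length + 2 = (o :: a ++ [closeOf o]).length from by simp,
              List.drop_left]
          unfold seg
          rw [hd2, show L - (e + a.length + 2) = b.length from by omega, List.take_left]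

theorem bal_of_chase {d : List Char} {G : List (Option Nat)}
    (HG : ∀ q, q < d.length → G.getD q none = gS d q) {L : Nat} (hL : L ≤ d.length) :
    ∀ (f e : Nat), e ≤ L → chase G L f e = L → Bal (seg d e L) := by
  intro f
  induction f with
  | zero =>
      intro e he hch
      have heL : e = L := hch
      subst heL
      unfold seg
      rw [Nat.sub_self]
      exact Bal.nil
  | succ f ih =>
      intro e he hch
      by_cases heL : e < L
      · simp only [chase, if_pos heL] at hch
        cases hG : G.getD e none with
        | none =>
            rw [hG] at hch
            dsimp only at hch
            omega
        | some q =>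
            rw [hG] at hch
            dsimp only at hch
            have hgs : gS d e = some q := by rw [← HG e (by omega), hG]
            obtain ⟨_, hq1, hq2, hbal⟩ := gS_sound hgs
            have hqL : q ≤ L := by
              by_contra hqgt
              push_neg at hqgt
              rw [chase_at_limit G L f q (le_of_lt hqgt)] at hch
              omega
            have hb2 := ih q hqL hch
            rw [← seg_append d (show e ≤ q from by omega) hqL]
            exact bal_append hbal hb2
      · have heq : e = L := by omega
        subst heq
        unfold seg
        rw [Nat.sub_self]
        exact Bal.nil

-- ---- assembling both sides ----

theorem rot1 (t : List Char) : t.drop 1 ++ t.take 1 = t.rotate 1 := by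
  match t with
  | [] => rfl
  | [a] => simp [List.rotate]
  | a :: b :: r =>
      simp [List.rotate]

theorem A_outer (m : Nat) (a : Int) (t : List Char) :
    (List.range m).foldl
      (fun (st : Int × List Char) _ =>
        let arr := st.2.foldl stepA []
        let answer := if arr.length = 0 then st.1 + 1 else st.1
        (answer, st.2.drop 1 ++ st.2.take 1)) (a, t)
    = (a + ((List.range m).map
          (fun k => if ((t.rotate k).foldl stepA []).length = 0 then (1:Int) else 0)).sum,
        t.rotate m) := by
  induction m generalizing a with
  | zero => simp
  | succ m ih =>
      rw [List.range_succ, List.foldl_append, ih, List.map_append, List.sum_append]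
      simp only [List.foldl_cons, List.foldl_nil, List.map_cons, List.map_nil, List.sum_cons,
        List.sum_nil, add_zero]
      rw [rot1, List.rotate_rotate]
      refine Prod.ext ?_ rfl
      simp only
      split_ifs <;> ring

theorem seg_rotate (l : List Char) (i : Nat) (hi : i ≤ l.length) :
    seg (l ++ l) i (i + l.length) = l.rotate i := by
  unfold seg
  rw [show i + l.length - i = l.length from by omega]
  rw [List.drop_append, show i - l.length = 0 from by omega, List.drop_zero]
  rw [List.take_append, List.take_of_length_le (by rw [List.length_drop]; omega),
    List.length_drop, show l.length - (l.length - i) = i from by omega]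
  rw [List.rotate_eq_drop_append_take hi]

-- ===== VERDICT (by name: the statement is the Claim_ definition above) =====
theorem solution_spec : Claim_equal_solution := by
  intro s _
  unfold Spec_solution solution solution_alt
  rw [A_outer]
  rw [PySem.List.foldl_add (g := fun i =>
    if chase ((buildTables (s.toList ++ s.toList)).1) (i + s.length) (s.length + 1) i
        = i + s.length then (1:Int) else 0)]
  simp only [zero_add]
  apply congrArg List.sum
  apply List.map_congr_left
  intro i hi
  have hin : i < s.length := List.mem_range.1 hi
  have hlen : s.length = s.toList.length := rfl
  have hin' : i < s.toList.length := by rw [← hlen]; exact hin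
  have HG := (build_correct (s.toList ++ s.toList)).1
  have hL : i + s.length ≤ (s.toList ++ s.toList).length := by
    rw [List.length_append, ← hlen]
    omega
  have hrot : seg (s.toList ++ s.toList) i (i + s.length) = s.toList.rotate i :=
    seg_rotate s.toList i (by omega)
  have hiff : (((s.toList.rotate i).foldl stepA []).length = 0)
      ↔ chase ((buildTables (s.toList ++ s.toList)).1) (i + s.length) (s.length + 1) i
          = i + s.length := by
    rw [check_iff, machine_bal_iff]
    constructor
    · intro hb
      exact chase_of_bal HG hL (s.toList.rotate i) hb (s.length + 1) i (by omega) hrot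
        (by rw [List.length_rotate, ← hlen]; omega)
        (by rw [List.length_rotate, ← hlen]; omega)
    · intro hc
      have hb := bal_of_chase HG hL (s.length + 1) i (by omega) hc
      rwa [hrot] at hb
  by_cases hA : ((s.toList.rotate i).foldl stepA []).length = 0
  · rw [if_pos hA, if_pos (hiff.1 hA)]
  · rw [if_neg hA, if_neg (fun h => hA (hiff.2 h))]
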